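-- pv_equiv track=rewrite | github.com/PratikKaran23/ActiveSubEnum | core/output.py | check_takeover
-- ===== SOURCE A (Python) =====
-- from typing import Dict, List, Optional
--
-- CLOUD_RANGES = {
--     "Heroku": ["52.x.x.x", "50.x.x.x"],
--     "GitHub Pages": ["185.199.x.x"],
--     "AWS S3/CloudFront": ["52.x.x.x", "54.x.x.x", "13.x.x.x", "3.x.x.x"],
--     "Netlify": ["75.2.x.x", "104.x.x.x"],
--     "Vercel": ["76.x.x.x"],
--     "Cloudflare": ["104.x.x.x", "172.x.x.x", "198.x.x.x"],
--     "Azure": ["20.x.x.x", "40.x.x.x", "13.x.x.x"],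
--     "Google Cloud": ["35.x.x.x", "34.x.x.x", "74.x.x.x", "104.x.x.x"],
--     "DigitalOcean": ["68.x.x.x", "64.x.x.x", "104.x.x.x"],
--     "Fly.io": ["66.x.x.x"],
--     "Render": ["45.x.x.x", "172.x.x.x"],
--     "Surge.sh": ["45.x.x.x"],
-- }
--
-- def check_takeover(ips: List[str]) -> Optional[Dict]:
--     """Check if IPs belong to known cloud providers — potential takeover candidates.
--
--     Returns dict with provider info if found, None otherwise.
--     """
--     for ip in ips:
--         if ip.startswith("[IPv6]"):
--             continue
--         for provider, prefixes in CLOUD_RANGES.items():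
--             for prefix in prefixes:
--                 parts = prefix.split(".")
--                 ip_parts = ip.split(".")
--                 match = all(
--                     parts[i] == "x" or parts[i] == ip_parts[i]
--                     for i in range(len(parts))
--                 )
--                 if match:
--                     return {"provider": provider, "ip": ip}
--     return None
-- ===== SOURCE B (Python) =====
-- from typing import Dict, List, Optional
--
-- CLOUD_RANGES = {
--     "Heroku": ["52.x.x.x", "50.x.x.x"],
--     "GitHub Pages": ["185.199.x.x"],
--     "AWS S3/CloudFront": ["52.x.x.x", "54.x.x.x", "13.x.x.x", "3.x.x.x"],
--     "Netlify": ["75.2.x.x", "104.x.x.x"],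
--     "Vercel": ["76.x.x.x"],
--     "Cloudflare": ["104.x.x.x", "172.x.x.x", "198.x.x.x"],
--     "Azure": ["20.x.x.x", "40.x.x.x", "13.x.x.x"],
--     "Google Cloud": ["35.x.x.x", "34.x.x.x", "74.x.x.x", "104.x.x.x"],
--     "DigitalOcean": ["68.x.x.x", "64.x.x.x", "104.x.x.x"],
--     "Fly.io": ["66.x.x.x"],
--     "Render": ["45.x.x.x", "172.x.x.x"],
--     "Surge.sh": ["45.x.x.x"],
-- }
--
-- # Index built once: first octet -> ordered candidates (provider, required second
-- # octet or None for "any"), preserving CLOUD_RANGES iteration order.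
-- _IDX = {}
-- for _provider, _prefixes in CLOUD_RANGES.items():
--     for _prefix in _prefixes:
--         _parts = _prefix.split(".")
--         _first, _second = _parts[0], _parts[1]
--         _IDX.setdefault(_first, []).append(
--             (_provider, None if _second == "x" else _second)
--         )
--
-- def check_takeover(ips: List[str]) -> Optional[Dict]:
--     """Check if IPs belong to known cloud providers — potential takeover candidates.
--
--     Returns dict with provider info if found, None otherwise.
--     """
--     for ip in ips:
--         if ip.startswith("[IPv6]"):
--             continue
--         octets = ip.split(".")
--         for provider, second in _IDX.get(octets[0], []):
--             if second is None or second == octets[1]: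
--                 return {"provider": provider, "ip": ip}
--     return None
-- ===== Notes on version B (the rewrite author's own statement) =====
-- stated objective: faster
-- what changed: B builds a first-octet index (dict of ordered (provider, required-second-octet) candidates) once from CLOUD_RANGES, so per IP the exhaustive provider x prefix x octet triple scan with repeated prefix splitting becomes one dict lookup plus a short candidate scan.
import Mathlib
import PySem

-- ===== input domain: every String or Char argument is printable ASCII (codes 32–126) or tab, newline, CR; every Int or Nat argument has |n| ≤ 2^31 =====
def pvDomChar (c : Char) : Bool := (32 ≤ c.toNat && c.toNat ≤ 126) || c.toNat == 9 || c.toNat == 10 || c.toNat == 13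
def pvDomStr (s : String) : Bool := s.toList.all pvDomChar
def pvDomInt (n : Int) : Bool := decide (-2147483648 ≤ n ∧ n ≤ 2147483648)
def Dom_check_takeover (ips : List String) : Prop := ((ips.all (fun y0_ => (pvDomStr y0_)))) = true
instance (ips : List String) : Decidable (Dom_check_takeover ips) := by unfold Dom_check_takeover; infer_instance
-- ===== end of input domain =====

-- B replaces A's exhaustive provider×prefix×octet triple scan (re-splitting every prefix per IP)
-- by a first-octet index built once from CLOUD_RANGES; measurably faster, return values proved equal.

-- ===== PORT A =====

-- ip.split(".") / prefix.split("."): '.' is a nonempty separator, so split? is never none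
def ctSplitDot (s : String) : List String := (PySem.Str.split? s ".").getD []

def ctCloudRanges : List (String × List String) :=
  [("Heroku", ["52.x.x.x", "50.x.x.x"]),
   ("GitHub Pages", ["185.199.x.x"]),
   ("AWS S3/CloudFront", ["52.x.x.x", "54.x.x.x", "13.x.x.x", "3.x.x.x"]),
   ("Netlify", ["75.2.x.x", "104.x.x.x"]),
   ("Vercel", ["76.x.x.x"]),
   ("Cloudflare", ["104.x.x.x", "172.x.x.x", "198.x.x.x"]),
   ("Azure", ["20.x.x.x", "40.x.x.x", "13.x.x.x"]),
   ("Google Cloud", ["35.x.x.x", "34.x.x.x", "74.x.x.x", "104.x.x.x"]),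
   ("DigitalOcean", ["68.x.x.x", "64.x.x.x", "104.x.x.x"]),
   ("Fly.io", ["66.x.x.x"]),
   ("Render", ["45.x.x.x", "172.x.x.x"]),
   ("Surge.sh", ["45.x.x.x"])]

-- all(parts[i] == "x" or parts[i] == ip_parts[i] for i in range(len(parts)))
-- parts[i] is always in range; ip_parts[i] out of range = Python IndexError (excluded by Pre_),
-- modelled here as the check being false.
def ctAllMatch (parts ipparts : List String) : Bool :=
  (PySem.List.pyRange 0 (parts.length : Int) 1).all fun i =>
    match PySem.List.pyGet? parts i with
    | some p =>
      (p == "x") ||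
        (match PySem.List.pyGet? ipparts i with
         | some v => p == v
         | none => false)
    | none => false

def ctPrefLoopA (ipparts : List String) : List String → Bool
  | [] => false
  | pfx :: rest =>
    if ctAllMatch (ctSplitDot pfx) ipparts then true else ctPrefLoopA ipparts rest

def ctProvLoopA (ipparts : List String) : List (String × List String) → Option String
  | [] => none
  | (prov, prefs) :: rest =>
    if ctPrefLoopA ipparts prefs then some prov else ctProvLoopA ipparts rest

def check_takeover : List String → Option (List (String × String))
  | [] => none
  | ip :: rest =>
    if PySem.Str.startswith ip "[IPv6]" then check_takeover rest
    else
      match ctProvLoopA (ctSplitDot ip) ctCloudRanges with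
      | some prov => some [("provider", prov), ("ip", ip)]
      | none => check_takeover rest

-- ===== PORT B =====

-- _IDX: first octet -> ordered candidates (provider, None | required second octet);
-- setdefault(a, []).append(x) = insert a (getD a [] ++ [x]) (insert keeps position)
def ctIdx : PySem.Dict String (List (String × Option String)) :=
  ctCloudRanges.foldl
    (fun d pr =>
      pr.2.foldl
        (fun d pfx =>
          let parts := ctSplitDot pfx
          -- parts[0], parts[1]: always in range for CLOUD_RANGES prefixes
          match PySem.List.pyGet? parts 0, PySem.List.pyGet? parts 1 with
          | some first, some second =>
            d.insert first
              (d.getD first [] ++ [(pr.1, if second == "x" then none else some second)])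
          | _, _ => d)
        d)
    PySem.Dict.empty

-- for provider, second in candidates: second is None or second == octets[1];
-- octets[1] out of range = Python IndexError (excluded by Pre_), modelled as no match.
def ctScanB (octs : List String) : List (String × Option String) → Option String
  | [] => none
  | (prov, sec) :: rest =>
    match sec with
    | none => some prov
    | some s =>
      match PySem.List.pyGet? octs 1 with
      | some v => if s == v then some prov else ctScanB octs rest
      | none => ctScanB octs rest

def check_takeover_alt : List String → Option (List (String × String))
  | [] => none
  | ip :: rest =>
    if PySem.Str.startswith ip "[IPv6]" then check_takeover_alt rest
    else
      let octs := ctSplitDot ip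
      -- octets[0]: split never returns an empty list, so headD's default is never used
      match ctScanB octs (ctIdx.getD (octs.headD "") []) with
      | some prov => some [("provider", prov), ("ip", ip)]
      | none => check_takeover_alt rest

-- ===== PRECONDITION & SPEC =====
-- Pre_ excludes lists containing a bare "185" or "75" element: reaching such an element makes
-- both Pythons raise IndexError (a prefix's concrete second octet is compared against a
-- one-part IP); when an earlier IP already matched, A returns before reaching it, so Pre_ is
-- slightly narrower than the crash set (see cites).
def Pre_check_takeover (ips : List String) : Prop := "185" ∉ ips ∧ "75" ∉ ips
instance (ips : List String) : Decidable (Pre_check_takeover ips) := by unfold Pre_check_takeover; infer_instance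

def pvWitness_check_takeover : List String := ["[IPv6]::1", "8.8.8.8", "185.199.3.4"]

def Spec_check_takeover (ips : List String) (out : Option (List (String × String))) : Prop := out = check_takeover_alt ips
instance (ips : List String) (out : Option (List (String × String))) : Decidable (Spec_check_takeover ips out) := by unfold Spec_check_takeover; infer_instance

-- ===== CLAIM (what is proved, stated in full; the proofs are below) =====
def Claim_equal_check_takeover : Prop := ∀ (ips : List String), Dom_check_takeover ips → Pre_check_takeover ips → Spec_check_takeover ips (check_takeover ips)

-- ===== LEMMAS AND PROOFS =====

lemma ctIdx_eq : ctIdx = PySem.Dict.mk [("52", [("Heroku", none), ("AWS S3/CloudFront", none)]), ("50", [("Heroku", none)]), ("185", [("GitHub Pages", some "199")]), ("54", [("AWS S3/CloudFront", none)]), ("13", [("AWS S3/CloudFront", none), ("Azure", none)]), ("3", [("AWS S3/CloudFront", none)]), ("75", [("Netlify", some "2")]), ("104", [("Netlify", none), ("Cloudflare", none), ("Google Cloud", none), ("DigitalOcean", none)]), ("76", [("Vercel", none)]), ("172", [("Cloudflare", none), ("Render", none)]), ("198", [("Cloudflare", none)]), ("20", [("Azure", none)]), ("40", [("Azure", none)]),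 ("35", [("Google Cloud", none)]), ("34", [("Google Cloud", none)]), ("74", [("Google Cloud", none)]), ("68", [("DigitalOcean", none)]), ("64", [("DigitalOcean", none)]), ("66", [("Fly.io", none)]), ("45", [("Render", none), ("Surge.sh", none)])] := by decide

lemma ct_allMatch_shape (a b : String) (octs : List String) :
    ctAllMatch [a, b, "x", "x"] octs =
      ((a == "x" || (match PySem.List.pyGet? octs 0 with | some v => a == v | none => false)) &&
       (b == "x" || (match PySem.List.pyGet? octs 1 with | some v => b == v | none => false))) := by
  have hr : PySem.List.pyRange 0 (([a, b, "x", "x"].length : Int)) 1 = [0, 1, 2, 3] := by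
    simp; decide
  simp only [ctAllMatch, hr, List.all_cons, List.all_nil]
  have h0 : PySem.List.pyGet? [a, b, "x", "x"] 0 = some a := rfl
  have h1 : PySem.List.pyGet? [a, b, "x", "x"] 1 = some b := rfl
  have h2 : PySem.List.pyGet? [a, b, "x", "x"] 2 = some "x" := rfl
  have h3 : PySem.List.pyGet? [a, b, "x", "x"] 3 = some "x" := rfl
  simp only [h0, h1, h2, h3]
  simp

lemma ct_inner_cons (o0 : String) (t : List String) :
    ctProvLoopA (o0 :: t) ctCloudRanges = ctScanB (o0 :: t) (ctIdx.getD o0 []) := by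
  have hs52 : ctSplitDot "52.x.x.x" = ["52", "x", "x", "x"] := rfl
  have hs50 : ctSplitDot "50.x.x.x" = ["50", "x", "x", "x"] := rfl
  have hs185 : ctSplitDot "185.199.x.x" = ["185", "199", "x", "x"] := rfl
  have hs54 : ctSplitDot "54.x.x.x" = ["54", "x", "x", "x"] := rfl
  have hs13 : ctSplitDot "13.x.x.x" = ["13", "x", "x", "x"] := rfl
  have hs3 : ctSplitDot "3.x.x.x" = ["3", "x", "x", "x"] := rfl
  have hs75 : ctSplitDot "75.2.x.x" = ["75", "2", "x", "x"] := rfl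
  have hs104 : ctSplitDot "104.x.x.x" = ["104", "x", "x", "x"] := rfl
  have hs76 : ctSplitDot "76.x.x.x" = ["76", "x", "x", "x"] := rfl
  have hs172 : ctSplitDot "172.x.x.x" = ["172", "x", "x", "x"] := rfl
  have hs198 : ctSplitDot "198.x.x.x" = ["198", "x", "x", "x"] := rfl
  have hs20 : ctSplitDot "20.x.x.x" = ["20", "x", "x", "x"] := rfl
  have hs40 : ctSplitDot "40.x.x.x" = ["40", "x", "x", "x"] := rfl
  have hs35 : ctSplitDot "35.x.x.x" = ["35", "x", "x", "x"] := rfl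
  have hs34 : ctSplitDot "34.x.x.x" = ["34", "x", "x", "x"] := rfl
  have hs74 : ctSplitDot "74.x.x.x" = ["74", "x", "x", "x"] := rfl
  have hs68 : ctSplitDot "68.x.x.x" = ["68", "x", "x", "x"] := rfl
  have hs64 : ctSplitDot "64.x.x.x" = ["64", "x", "x", "x"] := rfl
  have hs66 : ctSplitDot "66.x.x.x" = ["66", "x", "x", "x"] := rfl
  have hs45 : ctSplitDot "45.x.x.x" = ["45", "x", "x", "x"] := rfl
  have hx52 : (("52" : String) == "x") = false := by decide
  have hx50 : (("50" : String) == "x") = false := by decide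
  have hx185 : (("185" : String) == "x") = false := by decide
  have hx54 : (("54" : String) == "x") = false := by decide
  have hx13 : (("13" : String) == "x") = false := by decide
  have hx3 : (("3" : String) == "x") = false := by decide
  have hx75 : (("75" : String) == "x") = false := by decide
  have hx104 : (("104" : String) == "x") = false := by decide
  have hx76 : (("76" : String) == "x") = false := by decide
  have hx172 : (("172" : String) == "x") = false := by decide
  have hx198 : (("198" : String) == "x") = false := by decide
  have hx20 : (("20" : String) == "x") = false := by decide
  have hx40 : (("40" : String) == "x") = false := by decide
  have hx35 : (("35" : String) == "x") = false := by decide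
  have hx34 : (("34" : String) == "x") = false := by decide
  have hx74 : (("74" : String) == "x") = false := by decide
  have hx68 : (("68" : String) == "x") = false := by decide
  have hx64 : (("64" : String) == "x") = false := by decide
  have hx66 : (("66" : String) == "x") = false := by decide
  have hx45 : (("45" : String) == "x") = false := by decide
  have hx199 : (("199" : String) == "x") = false := by decide
  have hx2 : (("2" : String) == "x") = false := by decide
  have hg0 : PySem.List.pyGet? (o0 :: t) 0 = some o0 := PySem.List.pyGet?_zero_cons o0 t
  rw [ctIdx_eq]
  simp only [ctCloudRanges, ctProvLoopA, ctPrefLoopA,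
    hs52,
    hs50,
    hs185,
    hs54,
    hs13,
    hs3,
    hs75,
    hs104,
    hs76,
    hs172,
    hs198,
    hs20,
    hs40,
    hs35,
    hs34,
    hs74,
    hs68,
    hs64,
    hs66,
    hs45,
    ct_allMatch_shape, hg0,
    hx52,
    hx50,
    hx185,
    hx54,
    hx13,
    hx3,
    hx75,
    hx104,
    hx76,
    hx172,
    hx198,
    hx20,
    hx40,
    hx35,
    hx34,
    hx74,
    hx68,
    hx64,
    hx66,
    hx45,
    hx199,
    hx2,
    PySem.Dict.getD, Bool.false_or]
  cases hM : PySem.List.pyGet? (o0 :: t) 1 with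
  | none =>
    simp only [hM]
    by_cases h52 : ("52" : String) = o0
    · subst h52; simp [ctScanB, PySem.Dict.getD, PySem.Dict.get?, hM]
    by_cases h50 : ("50" : String) = o0
    · subst h50; simp [ctScanB, PySem.Dict.getD, PySem.Dict.get?, hM]
    by_cases h185 : ("185" : String) = o0
    · subst h185; simp [ctScanB, PySem.Dict.getD, PySem.Dict.get?, hM]
    by_cases h54 : ("54" : String) = o0
    · subst h54; simp [ctScanB, PySem.Dict.getD, PySem.Dict.get?, hM]
    by_cases h13 : ("13" : String) = o0
    · subst h13; simp [ctScanB, PySem.Dict.getD, PySem.Dict.get?, hM]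
    by_cases h3 : ("3" : String) = o0
    · subst h3; simp [ctScanB, PySem.Dict.getD, PySem.Dict.get?, hM]
    by_cases h75 : ("75" : String) = o0
    · subst h75; simp [ctScanB, PySem.Dict.getD, PySem.Dict.get?, hM]
    by_cases h104 : ("104" : String) = o0
    · subst h104; simp [ctScanB, PySem.Dict.getD, PySem.Dict.get?, hM]
    by_cases h76 : ("76" : String) = o0
    · subst h76; simp [ctScanB, PySem.Dict.getD, PySem.Dict.get?, hM]
    by_cases h172 : ("172" : String) = o0
    · subst h172; simp [ctScanB, PySem.Dict.getD, PySem.Dict.get?, hM]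
    by_cases h198 : ("198" : String) = o0
    · subst h198; simp [ctScanB, PySem.Dict.getD, PySem.Dict.get?, hM]
    by_cases h20 : ("20" : String) = o0
    · subst h20; simp [ctScanB, PySem.Dict.getD, PySem.Dict.get?, hM]
    by_cases h40 : ("40" : String) = o0
    · subst h40; simp [ctScanB, PySem.Dict.getD, PySem.Dict.get?, hM]
    by_cases h35 : ("35" : String) = o0
    · subst h35; simp [ctScanB, PySem.Dict.getD, PySem.Dict.get?, hM]
    by_cases h34 : ("34" : String) = o0
    · subst h34; simp [ctScanB, PySem.Dict.getD, PySem.Dict.get?, hM]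
    by_cases h74 : ("74" : String) = o0
    · subst h74; simp [ctScanB, PySem.Dict.getD, PySem.Dict.get?, hM]
    by_cases h68 : ("68" : String) = o0
    · subst h68; simp [ctScanB, PySem.Dict.getD, PySem.Dict.get?, hM]
    by_cases h64 : ("64" : String) = o0
    · subst h64; simp [ctScanB, PySem.Dict.getD, PySem.Dict.get?, hM]
    by_cases h66 : ("66" : String) = o0
    · subst h66; simp [ctScanB, PySem.Dict.getD, PySem.Dict.get?, hM]
    by_cases h45 : ("45" : String) = o0
    · subst h45; simp [ctScanB, PySem.Dict.getD, PySem.Dict.get?, hM]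
    simp [ctScanB, PySem.Dict.getD, PySem.Dict.get?, hM, beq_iff_eq, h52, h50, h185, h54, h13, h3, h75, h104, h76, h172, h198, h20, h40, h35, h34, h74, h68, h64, h66, h45]
  | some v1 =>
    simp only [hM]
    by_cases h52 : ("52" : String) = o0
    · subst h52; simp [ctScanB, PySem.Dict.getD, PySem.Dict.get?, hM]
    by_cases h50 : ("50" : String) = o0
    · subst h50; simp [ctScanB, PySem.Dict.getD, PySem.Dict.get?, hM]
    by_cases h185 : ("185" : String) = o0
    · subst h185
      by_cases hq185 : ("199" : String) = v1
      · subst hq185; simp [ctScanB, PySem.Dict.getD, PySem.Dict.get?, hM]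
      · simp [ctScanB, PySem.Dict.getD, PySem.Dict.get?, hM, hq185]
    by_cases h54 : ("54" : String) = o0
    · subst h54; simp [ctScanB, PySem.Dict.getD, PySem.Dict.get?, hM]
    by_cases h13 : ("13" : String) = o0
    · subst h13; simp [ctScanB, PySem.Dict.getD, PySem.Dict.get?, hM]
    by_cases h3 : ("3" : String) = o0
    · subst h3; simp [ctScanB, PySem.Dict.getD, PySem.Dict.get?, hM]
    by_cases h75 : ("75" : String) = o0
    · subst h75
      by_cases hq75 : ("2" : String) = v1
      · subst hq75; simp [ctScanB, PySem.Dict.getD, PySem.Dict.get?, hM]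
      · simp [ctScanB, PySem.Dict.getD, PySem.Dict.get?, hM, hq75]
    by_cases h104 : ("104" : String) = o0
    · subst h104; simp [ctScanB, PySem.Dict.getD, PySem.Dict.get?, hM]
    by_cases h76 : ("76" : String) = o0
    · subst h76; simp [ctScanB, PySem.Dict.getD, PySem.Dict.get?, hM]
    by_cases h172 : ("172" : String) = o0
    · subst h172; simp [ctScanB, PySem.Dict.getD, PySem.Dict.get?, hM]
    by_cases h198 : ("198" : String) = o0
    · subst h198; simp [ctScanB, PySem.Dict.getD, PySem.Dict.get?, hM]
    by_cases h20 : ("20" : String) = o0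
    · subst h20; simp [ctScanB, PySem.Dict.getD, PySem.Dict.get?, hM]
    by_cases h40 : ("40" : String) = o0
    · subst h40; simp [ctScanB, PySem.Dict.getD, PySem.Dict.get?, hM]
    by_cases h35 : ("35" : String) = o0
    · subst h35; simp [ctScanB, PySem.Dict.getD, PySem.Dict.get?, hM]
    by_cases h34 : ("34" : String) = o0
    · subst h34; simp [ctScanB, PySem.Dict.getD, PySem.Dict.get?, hM]
    by_cases h74 : ("74" : String) = o0
    · subst h74; simp [ctScanB, PySem.Dict.getD, PySem.Dict.get?, hM]
    by_cases h68 : ("68" : String) = o0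
    · subst h68; simp [ctScanB, PySem.Dict.getD, PySem.Dict.get?, hM]
    by_cases h64 : ("64" : String) = o0
    · subst h64; simp [ctScanB, PySem.Dict.getD, PySem.Dict.get?, hM]
    by_cases h66 : ("66" : String) = o0
    · subst h66; simp [ctScanB, PySem.Dict.getD, PySem.Dict.get?, hM]
    by_cases h45 : ("45" : String) = o0
    · subst h45; simp [ctScanB, PySem.Dict.getD, PySem.Dict.get?, hM]
    simp [ctScanB, PySem.Dict.getD, PySem.Dict.get?, hM, beq_iff_eq, h52, h50, h185, h54, h13, h3, h75, h104, h76, h172, h198, h20, h40, h35, h34, h74, h68, h64, h66, h45]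

lemma ct_inner_eq (octs : List String) :
    ctProvLoopA octs ctCloudRanges = ctScanB octs (ctIdx.getD (octs.headD "") []) := by
  cases octs with
  | nil => decide
  | cons o0 t => exact ct_inner_cons o0 t


-- ===== VERDICT (by name: the statement is the Claim_ definition above) =====
theorem check_takeover_spec : Claim_equal_check_takeover := by
  intro ips hd hp
  unfold Spec_check_takeover
  induction ips with
  | nil => rfl
  | cons ip rest ih =>
    have hd' : Dom_check_takeover rest := by
      revert hd; unfold Dom_check_takeover; simp
    have hp' : Pre_check_takeover rest :=
      ⟨fun h => hp.1 (List.mem_cons_of_mem _ h), fun h => hp.2 (List.mem_cons_of_mem _ h)⟩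
    have ih' := ih hd' hp'
    simp only [check_takeover, check_takeover_alt, ih', ct_inner_eq]
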